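-- pv_equiv track=rewrite | github.com/repp/big-phoney | big_phoney/utils.py | count_phonemes_with_emphasis
-- ===== SOURCE A (Python) =====
-- def count_phonemes_with_emphasis(phonetic_sp):
--
--     def phone_has_emphasis(phone):
--         if len(phone) == 0:
--             return False
--         return phone.strip()[-1].isdigit()
--
--     count = 0
--     for phone in phonetic_sp.split():
--         if phone_has_emphasis(phone):
--             count += 1
--     return count
-- ===== SOURCE B (Python) =====
-- def count_phonemes_with_emphasis(phonetic_sp):
--     # single left-to-right character scan: count digits followed by whitespace or end of string
--     count = 0
--     prev_digit = False
--     for ch in phonetic_sp: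
--         if prev_digit and ch.isspace():
--             count += 1
--         prev_digit = ch.isdigit()
--     if prev_digit:
--         count += 1
--     return count
-- ===== Notes on version B (the rewrite author's own statement) =====
-- stated objective: alternative
-- what changed: Replaces split()-then-test-each-token with a single character scan carrying a prev-char-is-digit flag, counting digits immediately followed by whitespace or end of string; no token list is ever built.
import Mathlib
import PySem

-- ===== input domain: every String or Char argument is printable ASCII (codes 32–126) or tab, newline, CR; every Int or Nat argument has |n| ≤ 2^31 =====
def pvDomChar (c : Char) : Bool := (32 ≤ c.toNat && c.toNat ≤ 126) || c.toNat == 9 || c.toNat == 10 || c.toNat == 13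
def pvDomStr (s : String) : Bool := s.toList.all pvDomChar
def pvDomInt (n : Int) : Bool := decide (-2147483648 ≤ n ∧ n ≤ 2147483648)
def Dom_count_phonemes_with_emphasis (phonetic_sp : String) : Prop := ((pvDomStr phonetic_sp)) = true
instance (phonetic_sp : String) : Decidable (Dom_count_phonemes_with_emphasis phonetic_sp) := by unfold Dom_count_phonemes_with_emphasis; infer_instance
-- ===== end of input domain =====

-- B replaces A's split()-then-test-each-token loop by a single character scan with a
-- prev-char-is-digit flag (alternative decomposition, same O(n) cost).


-- ===== PORT A =====
-- inner helper phone_has_emphasis; '.strip()[-1]' is PySem.Str.pyGet? (strip …) (-1)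
-- (none = Python's IndexError, unreachable for split() tokens; mapped to false here)
def phone_has_emphasis (phone : String) : Bool :=
  if PySem.Str.len phone = 0 then false
  else
    match PySem.Str.pyGet? (PySem.Str.strip phone) (-1) with
    | some c => PySem.Chars.isdigit c
    | none => false

def count_phonemes_with_emphasis (phonetic_sp : String) : Int :=
  (PySem.Str.split₀ phonetic_sp).foldl
    (fun count phone => if phone_has_emphasis phone then count + 1 else count) 0

-- ===== PORT B =====
def count_phonemes_with_emphasis_alt (phonetic_sp : String) : Int :=
  let st := phonetic_sp.toList.foldl
    (fun (st : Int × Bool) ch =>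
      (if st.2 && PySem.Chars.isspace ch then st.1 + 1 else st.1, PySem.Chars.isdigit ch))
    (0, false)
  if st.2 then st.1 + 1 else st.1

-- ===== PRECONDITION & SPEC =====
def Spec_count_phonemes_with_emphasis (phonetic_sp : String) (out : Int) : Prop := out = count_phonemes_with_emphasis_alt phonetic_sp
instance (phonetic_sp : String) (out : Int) : Decidable (Spec_count_phonemes_with_emphasis phonetic_sp out) := by unfold Spec_count_phonemes_with_emphasis; infer_instance

-- ===== CLAIM (what is proved, stated in full; the proofs are below) =====
def Claim_equal_count_phonemes_with_emphasis : Prop := ∀ (phonetic_sp : String), Dom_count_phonemes_with_emphasis phonetic_sp → Spec_count_phonemes_with_emphasis phonetic_sp (count_phonemes_with_emphasis phonetic_sp)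

-- ===== LEMMAS AND PROOFS =====



-- A's per-token test, phrased on List Char
def tokEmph (t : List Char) : Bool :=
  if t.length = 0 then false
  else
    match PySem.List.pyGet? (PySem.Chars.strip t) (-1) with
    | some c => PySem.Chars.isdigit c
    | none => false

lemma phone_has_emphasis_ofList (t : List Char) :
    phone_has_emphasis (String.ofList t) = tokEmph t := by
  unfold phone_has_emphasis tokEmph
  rw [show PySem.Str.len (String.ofList t) = (t.length : Int) from by simp [PySem.Str.len]]
  rw [show PySem.Str.strip (String.ofList t) = String.ofList (PySem.Chars.strip t) from by
        simp [PySem.Str.strip]]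
  rw [show PySem.Str.pyGet? (String.ofList (PySem.Chars.strip t)) (-1)
        = PySem.List.pyGet? (PySem.Chars.strip t) (-1) from by
        simp [PySem.Str.pyGet?, PySem.Chars.pyGet?_eq_listPyGet?]]
  norm_num

-- B's scan, with the count peeled off the fold state
def scanB : List Char → Bool → Int
  | [], prev => if prev then 1 else 0
  | c :: rest, prev =>
      (if prev && PySem.Chars.isspace c then 1 else 0) + scanB rest (PySem.Chars.isdigit c)

lemma alt_fold_eq_scanB (l : List Char) (n : Int) (b : Bool) :
    (let st := l.foldl
        (fun (st : Int × Bool) ch =>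
          (if st.2 && PySem.Chars.isspace ch then st.1 + 1 else st.1, PySem.Chars.isdigit ch))
        (n, b);
      if st.2 then st.1 + 1 else st.1) = n + scanB l b := by
  induction l generalizing n b with
  | nil => cases b <;> simp [scanB]
  | cons c rest ih =>
    simp only [List.foldl_cons, scanB]
    rw [ih]
    split_ifs <;> ring

lemma isdigit_of_isspace (c : Char) (h : PySem.Chars.isspace c = true) :
    PySem.Chars.isdigit c = false := by
  simp only [PySem.Chars.isspace, Bool.or_eq_true, Bool.and_eq_true, decide_eq_true_eq] at h
  rw [Bool.eq_false_iff]
  intro hd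
  simp only [PySem.Chars.isdigit, Bool.and_eq_true, decide_eq_true_eq, Char.le_def] at hd
  change (48:UInt32) ≤ c.val ∧ c.val ≤ 57 at hd
  rw [UInt32.le_iff_toNat_le, UInt32.le_iff_toNat_le] at hd
  have hcv : c.toNat = c.val.toNat := rfl
  have h48 : (48:UInt32).toNat = 48 := rfl
  have h57 : (57:UInt32).toNat = 57 := rfl
  rw [h48, h57] at hd
  rcases h with ((((((((((h | h) | h) | h) | h) | h) | h) | h) | h) | h) | h) | h <;> omega

lemma strip_no_ws (t : List Char) (h : ∀ c ∈ t, PySem.Chars.isspace c = false) :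
    PySem.Chars.strip t = t := by
  have hl : PySem.Chars.lstrip t = t := by
    simp only [PySem.Chars.lstrip, List.dropWhile_eq_self_iff]
    intro hne
    simp [h _ (List.getElem_mem hne)]
  have hr : PySem.Chars.rstrip t = t := by
    simp only [PySem.Chars.rstrip]
    rw [List.dropWhile_eq_self_iff.mpr]
    · exact List.reverse_reverse t
    · intro hne
      have hlen : 0 < t.length := by simpa using hne
      rw [List.getElem_reverse]
      simp only [Nat.sub_zero, Bool.not_eq_true]
      exact h _ (List.getElem_mem (by omega))
  simp [PySem.Chars.strip, hl, hr]

lemma tokEmph_reverse_cons (d : Char) (ds : List Char)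
    (h : ∀ c ∈ d :: ds, PySem.Chars.isspace c = false) :
    tokEmph ((d :: ds).reverse) = PySem.Chars.isdigit d := by
  have hs : PySem.Chars.strip ((d :: ds).reverse) = (d :: ds).reverse :=
    strip_no_ws _ (by intro c hc; exact h c (by rw [List.mem_reverse] at hc; exact hc))
  rw [List.reverse_cons] at hs
  simp only [tokEmph, List.reverse_cons, hs]
  rw [PySem.List.pyGet?_neg_one_append_singleton]
  simp

def prevOf : List Char → Bool
  | [] => false
  | c :: _ => PySem.Chars.isdigit c

lemma go_nil (cur : List Char) (acc : List (List Char)) :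
    PySem.Chars.split₀.go [] cur acc
      = if cur.isEmpty then acc.reverse else (cur.reverse :: acc).reverse := rfl

lemma go_cons (c : Char) (rest cur : List Char) (acc : List (List Char)) :
    PySem.Chars.split₀.go (c :: rest) cur acc
      = if PySem.Chars.isspace c then
          (if cur.isEmpty then PySem.Chars.split₀.go rest [] acc
           else PySem.Chars.split₀.go rest [] (cur.reverse :: acc))
        else PySem.Chars.split₀.go rest (c :: cur) acc := rfl

lemma split₀_go_count (l : List Char) :
    ∀ (cur : List Char) (acc : List (List Char)),
      (∀ c ∈ cur, PySem.Chars.isspace c = false) →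
      ((PySem.Chars.split₀.go l cur acc).countP tokEmph : Int)
        = (acc.countP tokEmph : Int) + scanB l (prevOf cur) := by
  induction l with
  | nil =>
    intro cur acc hcur
    cases cur with
    | nil => simp [go_nil, scanB, prevOf, List.countP_reverse]
    | cons d ds =>
      rw [go_nil]
      simp only [List.isEmpty_cons, Bool.false_eq_true, if_false, scanB, prevOf]
      rw [List.countP_reverse, List.countP_cons, tokEmph_reverse_cons d ds hcur]
      split_ifs <;> push_cast <;> omega
  | cons c rest ih =>
    intro cur acc hcur
    rw [go_cons]
    by_cases hc : PySem.Chars.isspace c = true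
    · cases cur with
      | nil =>
        rw [if_pos hc]
        simp only [List.isEmpty_nil, if_true]
        rw [ih [] acc (by simp)]
        simp [scanB, prevOf, hc, isdigit_of_isspace c hc]
      | cons d ds =>
        rw [if_pos hc]
        simp only [List.isEmpty_cons, Bool.false_eq_true, if_false]
        rw [ih [] ((d :: ds).reverse :: acc) (by simp)]
        rw [List.countP_cons, tokEmph_reverse_cons d ds hcur]
        simp only [scanB, prevOf, hc, isdigit_of_isspace c hc, Bool.and_true]
        split_ifs <;> push_cast <;> omega
    · rw [if_neg hc]
      rw [ih (c :: cur) acc (by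
        intro x hx
        rcases List.mem_cons.mp hx with h1 | h2
        · subst h1; simpa using hc
        · exact hcur x h2)]
      simp only [scanB, prevOf, hc, Bool.and_false]
      cases cur <;> simp

lemma foldl_if_count (ts : List String) (n : Int) :
    ts.foldl (fun count phone => if phone_has_emphasis phone then count + 1 else count) n
      = n + (ts.countP phone_has_emphasis : Int) := by
  induction ts generalizing n with
  | nil => simp
  | cons t ts ih =>
    simp only [List.foldl_cons, List.countP_cons, ih]
    split_ifs <;> push_cast <;> omega

-- ===== VERDICT (by name: the statement is the Claim_ definition above) =====
theorem count_phonemes_with_emphasis_spec : Claim_equal_count_phonemes_with_emphasis := by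
  intro s _
  show count_phonemes_with_emphasis s = count_phonemes_with_emphasis_alt s
  unfold count_phonemes_with_emphasis count_phonemes_with_emphasis_alt
  rw [alt_fold_eq_scanB]
  rw [PySem.Str.split₀, foldl_if_count, List.countP_map]
  have hP : (phone_has_emphasis ∘ String.ofList) = tokEmph := by
    funext t; exact phone_has_emphasis_ofList t
  rw [hP]
  have hmain := split₀_go_count s.toList [] [] (by simp)
  simp only [List.countP_nil, Nat.cast_zero, zero_add] at hmain
  simp only [PySem.Chars.split₀]
  rw [hmain]
  simp [prevOf]
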